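-- pv_equiv track=rewrite | github.com/ivansg44/AMR-TV | amr_tv/node_link_diagram/utils.py | get_transmission_network_node_indices_dict
-- ===== SOURCE A (Python) =====
-- def get_transmission_network_node_indices_dict(transmission_events):
--     """Assigns an index to each unique node in transmission_events.
--
--     This is useful when making the networkX graph, as
--     transmission_events details every one-to-one relationship, so
--     nodes may appear twice.
--
--     :param transmission_events: See run_transmission_events_query
--     return value.
--     :type transmission_events: list[list]
--     :return: Concatenated and stringified amr_genotypes, min_date, and
--     organism_groups of unique nodes, and an assigned index.
--     :rtype: dict[str, int]
--     """
--     node_indices_dict = {}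
--     count = 0
--     for event in transmission_events:
--         str_node_one = str(event[0:3])
--         str_node_two = str(event[3:])
--         if str_node_one not in node_indices_dict:
--             node_indices_dict[str_node_one] = count
--             count += 1
--         if str_node_two not in node_indices_dict:
--             node_indices_dict[str_node_two] = count
--             count += 1
--     return node_indices_dict
-- ===== SOURCE B (Python) =====
-- def get_transmission_network_node_indices_dict(transmission_events):
--     nodes = []
--     for event in transmission_events:
--         nodes.append(str(event[0:3]))
--         nodes.append(str(event[3:]))
--     return {node: i for i, node in enumerate(dict.fromkeys(nodes))}
-- ===== Notes on version B (the rewrite author's own statement) =====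
-- stated objective: idiomatic
-- what changed: Replaces the interleaved membership-test-and-counter loop with three separate phases: collect all node strings in order, deduplicate preserving first occurrence with dict.fromkeys, then assign indices with enumerate.
import Mathlib
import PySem

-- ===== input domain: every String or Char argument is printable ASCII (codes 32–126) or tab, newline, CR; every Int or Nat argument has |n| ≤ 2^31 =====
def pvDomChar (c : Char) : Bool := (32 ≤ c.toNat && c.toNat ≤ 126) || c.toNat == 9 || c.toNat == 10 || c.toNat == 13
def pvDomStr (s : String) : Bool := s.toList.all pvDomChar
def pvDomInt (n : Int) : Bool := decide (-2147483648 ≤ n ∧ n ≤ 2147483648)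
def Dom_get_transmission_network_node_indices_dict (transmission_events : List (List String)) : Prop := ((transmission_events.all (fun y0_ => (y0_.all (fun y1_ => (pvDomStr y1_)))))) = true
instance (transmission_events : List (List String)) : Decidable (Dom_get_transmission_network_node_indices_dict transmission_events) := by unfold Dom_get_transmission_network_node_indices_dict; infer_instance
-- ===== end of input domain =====

-- B restructures A's single interleaved membership-and-count loop into three phases
-- (collect node strings, dedup keeping first occurrence, enumerate); objective: idiomatic.

-- Shared helper: Python's repr of a str, exact on the domain's characters
-- (printable ASCII plus tab/newline/CR; Python would use \xNN escapes only outside it).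
def pyReprStrChars (s : String) : List Char :=
  let cs := s.toList
  let q : Char := if cs.contains '\'' && !(cs.contains '"') then '"' else '\''
  q :: cs.flatMap (fun c =>
    if c = '\\' then ['\\', '\\']
    else if c = q then ['\\', q]
    else if c = '\t' then ['\\', 't']
    else if c = '\n' then ['\\', 'n']
    else if c = '\r' then ['\\', 'r']
    else [c]) ++ [q]

-- Shared helper: Python's str(list_of_str) = '[' + ', '.join(repr(x)) + ']'.
def pyStrListStr (xs : List String) : String :=
  String.ofList ('[' :: (List.intercalate [',', ' '] (xs.map pyReprStrChars)) ++ [']'])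

-- ===== PORT A =====
def get_transmission_network_node_indices_dict (transmission_events : List (List String)) : List (String × Int) :=
  let st := transmission_events.foldl
    (fun (st : PySem.Dict String Int × Int) event =>
      let str_node_one := pyStrListStr (PySem.List.slice event (some 0) (some 3))
      let str_node_two := pyStrListStr (PySem.List.slice event (some 3) none)
      let st1 := if st.1.contains str_node_one then st else (st.1.insert str_node_one st.2, st.2 + 1)
      if st1.1.contains str_node_two then st1 else (st1.1.insert str_node_two st1.2, st1.2 + 1))
    (PySem.Dict.empty, 0)
  st.1.items

-- ===== PORT B =====
def get_transmission_network_node_indices_dict_alt (transmission_events : List (List String)) : List (String × Int) :=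
  let nodes := transmission_events.foldl
    (fun (acc : List String) event =>
      acc ++ [pyStrListStr (PySem.List.slice event (some 0) (some 3))]
          ++ [pyStrListStr (PySem.List.slice event (some 3) none)]) []
  (PySem.List.enumerate (PySem.Set.ofList nodes) 0).map (fun p => (p.2, p.1))

-- ===== PRECONDITION & SPEC =====
def Spec_get_transmission_network_node_indices_dict (transmission_events : List (List String)) (out : List (String × Int)) : Prop := out = get_transmission_network_node_indices_dict_alt transmission_events
instance (transmission_events : List (List String)) (out : List (String × Int)) : Decidable (Spec_get_transmission_network_node_indices_dict transmission_events out) := by unfold Spec_get_transmission_network_node_indices_dict; infer_instance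

-- ===== CLAIM (what is proved, stated in full; the proofs are below) =====
def Claim_equal_get_transmission_network_node_indices_dict : Prop := ∀ (transmission_events : List (List String)), Dom_get_transmission_network_node_indices_dict transmission_events → Spec_get_transmission_network_node_indices_dict transmission_events (get_transmission_network_node_indices_dict transmission_events)

-- ===== LEMMAS AND PROOFS =====

-- proof-only names, definitionally equal to the ports' inline lambdas
def fA (event : List String) : String := pyStrListStr (PySem.List.slice event (some 0) (some 3))
def gA (event : List String) : String := pyStrListStr (PySem.List.slice event (some 3) none)

def stepA (st : PySem.Dict String Int × Int) (event : List String) : PySem.Dict String Int × Int :=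
  let st1 := if st.1.contains (fA event) then st else (st.1.insert (fA event) st.2, st.2 + 1)
  if st1.1.contains (gA event) then st1 else (st1.1.insert (gA event) st1.2, st1.2 + 1)

def addStep (acc : List String) (event : List String) : List String :=
  PySem.Set.add (PySem.Set.add acc (fA event)) (gA event)

def collectStep (acc : List String) (event : List String) : List String :=
  acc ++ [fA event] ++ [gA event]

-- items of A's dict, phrased as the swapped enumeration of the key list
def swapEnum (u : List String) : List (String × Int) :=
  (PySem.List.enumerate u 0).map (fun p => (p.2, p.1))

theorem swapEnum_append_singleton (u : List String) (s : String) :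
    swapEnum (u ++ [s]) = swapEnum u ++ [(s, (u.length : Int))] := by
  simp [swapEnum, PySem.List.enumerate_append, PySem.List.enumerate_cons, PySem.List.enumerate_nil]

theorem keys_of_items_swapEnum (d : PySem.Dict String Int) (u : List String)
    (h : d.items = swapEnum u) : d.keys = u := by
  have hk : d.keys = d.items.map (·.1) := rfl
  rw [hk, h]
  unfold swapEnum
  rw [List.map_map]
  exact PySem.List.map_snd_enumerate u 0

theorem one_step (d : PySem.Dict String Int) (u : List String) (s : String)
    (h : d.items = swapEnum u) :
    ∃ D : PySem.Dict String Int,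
      (if d.contains s then (d, (u.length : Int)) else (d.insert s (u.length : Int), (u.length : Int) + 1))
          = (D, ((PySem.Set.add u s).length : Int))
        ∧ D.items = swapEnum (PySem.Set.add u s) := by
  have hk : d.keys = u := keys_of_items_swapEnum d u h
  by_cases hm : s ∈ u
  · have hc : d.contains s = true := by
      rw [PySem.Dict.contains_eq_decide_mem_keys, hk]; simp [hm]
    refine ⟨d, ?_, ?_⟩
    · rw [if_pos hc, PySem.Set.add_of_mem hm]
    · rw [PySem.Set.add_of_mem hm]; exact h
  · have hc : d.contains s = false := by
      rw [PySem.Dict.contains_eq_decide_mem_keys, hk]; simp [hm]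
    refine ⟨d.insert s (u.length : Int), ?_, ?_⟩
    · rw [if_neg (by simp [hc]), PySem.Set.add_of_not_mem hm]
      simp [List.length_append]
    · rw [PySem.Set.add_of_not_mem hm, PySem.Dict.items_insert_of_not_contains, h,
        swapEnum_append_singleton]
      exact hc

theorem stepA_eq (d : PySem.Dict String Int) (u : List String) (e : List String)
    (h : d.items = swapEnum u) :
    ∃ D : PySem.Dict String Int,
      stepA (d, (u.length : Int)) e = (D, ((addStep u e).length : Int))
        ∧ D.items = swapEnum (addStep u e) := by
  obtain ⟨D1, hD1, hI1⟩ := one_step d u (fA e) h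
  obtain ⟨D2, hD2, hI2⟩ := one_step D1 (PySem.Set.add u (fA e)) (gA e) hI1
  refine ⟨D2, ?_, ?_⟩
  · simp only [stepA, addStep, hD1, hD2]
  · simpa [addStep] using hI2

theorem core (te : List (List String)) :
    ∀ (u : List String) (d : PySem.Dict String Int), d.items = swapEnum u →
    ((te.foldl stepA (d, (u.length : Int))).1).items = swapEnum (te.foldl addStep u) := by
  induction te with
  | nil => intro u d h; simpa using h
  | cons e rest ih =>
    intro u d h
    obtain ⟨D, hD, hI⟩ := stepA_eq d u e h
    simp only [List.foldl_cons, hD]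
    exact ih (addStep u e) D hI

theorem ofList_flat (te : List (List String)) :
    ∀ (u : List String),
      (te.foldl collectStep []).foldl PySem.Set.add u = te.foldl addStep u := by
  have gen : ∀ (te : List (List String)) (pre u : List String),
      (te.foldl collectStep pre).foldl PySem.Set.add u
        = te.foldl addStep (pre.foldl PySem.Set.add u) := by
    intro te
    induction te with
    | nil => intro pre u; rfl
    | cons e rest ih =>
      intro pre u
      simp only [List.foldl_cons, collectStep, addStep]
      rw [ih]
      simp [List.foldl_append]
  intro u
  simpa using gen te [] u

-- ===== VERDICT (by name: the statement is the Claim_ definition above) =====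
theorem get_transmission_network_node_indices_dict_spec : Claim_equal_get_transmission_network_node_indices_dict := by
  intro te _
  show get_transmission_network_node_indices_dict te = get_transmission_network_node_indices_dict_alt te
  have hA : get_transmission_network_node_indices_dict te
      = (te.foldl stepA (PySem.Dict.empty, ((List.length ([] : List String) : Int)))).1.items := rfl
  have hB : get_transmission_network_node_indices_dict_alt te
      = (PySem.List.enumerate (PySem.Set.ofList (te.foldl collectStep [])) 0).map (fun p => (p.2, p.1)) := rfl
  rw [hA, hB, core te [] PySem.Dict.empty rfl, PySem.Set.ofList_eq_foldl, ofList_flat te []]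
  rfl
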